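-- pv_equiv track=rewrite | github.com/jjanmo/python101 | review/problems/section03/pb06.py | solution
-- ===== SOURCE A (Python) =====
-- def solution(n, table):
--     total = 0
--     for row in table:
--         cur = 0
--         for i in row:
--             cur += i
--         if total < cur:
--             total = cur
--
--     for j in range(n):
--         cur = 0
--         for k in range(n):
--             cur += table[k][j]
--         if total < cur:
--             total = cur
--
--     d1 = 0
--     d2 = 0
--     for k in range(n):
--         d1 += table[k][k]
--         d2 += table[k][n - k - 1]
--     if total < d1:
--         total = d1
--     if total < d2:
--         total = d2
--
--     return total
-- ===== SOURCE B (Python) =====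
-- def solution(n, table):
--     # one fused pass over the first n rows maintaining column sums and both
--     # diagonals, instead of A's separate index-based scans
--     m = n if n > 0 else 0
--     best = 0
--     for row in table:
--         best = max(best, sum(row))
--     cols = [0] * m
--     d1 = 0
--     d2 = 0
--     for i, row in enumerate(table[:m]):
--         cols = [c + v for c, v in zip(cols, row)]
--         d1 += row[i]
--         d2 += row[m - 1 - i]
--     for c in cols:
--         best = max(best, c)
--     return max(best, d1, d2)
-- ===== Notes on version B (the rewrite author's own statement) =====
-- stated objective: alternative
-- what changed: Replaces A's four index-based scans (per-row loop, nested range(n) column loop, range(n) diagonal loop) with one fused enumerate pass over the first n rows that maintains a column-sum vector via zip and both diagonal accumulators, then folds max over the results.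
import Mathlib
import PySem

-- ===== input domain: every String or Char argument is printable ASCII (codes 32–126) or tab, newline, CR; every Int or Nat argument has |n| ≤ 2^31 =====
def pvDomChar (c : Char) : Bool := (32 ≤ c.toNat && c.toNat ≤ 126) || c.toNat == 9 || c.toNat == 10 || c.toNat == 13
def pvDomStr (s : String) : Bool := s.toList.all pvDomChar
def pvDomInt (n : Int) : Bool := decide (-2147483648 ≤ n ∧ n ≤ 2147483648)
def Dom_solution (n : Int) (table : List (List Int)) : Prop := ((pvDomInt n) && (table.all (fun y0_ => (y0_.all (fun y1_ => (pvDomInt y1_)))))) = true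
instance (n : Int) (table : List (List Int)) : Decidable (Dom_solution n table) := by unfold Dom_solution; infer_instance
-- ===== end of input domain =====

-- B replaces A's four separate index-based scans by one fused enumerate pass over
-- the first n rows that maintains column sums (via zip) and both diagonals.

-- ===== PORT A =====
def solution (n : Int) (table : List (List Int)) : Int :=
  let total := table.foldl (fun total row =>
      let cur := row.foldl (fun cur i => cur + i) 0
      if total < cur then cur else total) 0
  let total := (PySem.List.pyRange 0 n 1).foldl (fun total j =>
      let cur := (PySem.List.pyRange 0 n 1).foldl
          (fun cur k => cur + PySem.List.pyGetD (PySem.List.pyGetD table k []) j 0) 0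
      if total < cur then cur else total) total
  let d := (PySem.List.pyRange 0 n 1).foldl
      (fun d k => (d.1 + PySem.List.pyGetD (PySem.List.pyGetD table k []) k 0,
                   d.2 + PySem.List.pyGetD (PySem.List.pyGetD table k []) (n - k - 1) 0))
      ((0 : Int), (0 : Int))
  let total := if total < d.1 then d.1 else total
  let total := if total < d.2 then d.2 else total
  total

-- ===== PORT B =====
def solution_alt (n : Int) (table : List (List Int)) : Int :=
  let m : Int := if n > 0 then n else 0
  let best := table.foldl (fun best row => max best row.sum) 0
  let st := (PySem.List.enumerate (PySem.List.slice table none (some m)) 0).foldl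
      (fun st p =>
        ((st.1.zip p.2).map (fun q => q.1 + q.2),
         st.2.1 + PySem.List.pyGetD p.2 p.1 0,
         st.2.2 + PySem.List.pyGetD p.2 (m - 1 - p.1) 0))
      (List.replicate m.toNat 0, (0 : Int), (0 : Int))
  let best := st.1.foldl (fun best c => max best c) best
  max best (max st.2.1 st.2.2)

-- ===== PRECONDITION & SPEC =====
-- Pre_ excludes exactly the inputs on which A raises IndexError: when n > 0 the
-- table must have at least n rows and each of its first n rows at least n entries.
def Pre_solution (n : Int) (table : List (List Int)) : Prop :=
  n ≤ table.length ∧ ∀ row ∈ table.take n.toNat, n ≤ row.length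
instance (n : Int) (table : List (List Int)) : Decidable (Pre_solution n table) := by
  unfold Pre_solution; infer_instance
def pvWitness_solution : Int × List (List Int) := (2, [[1, 2], [3, 4]])
def Spec_solution (n : Int) (table : List (List Int)) (out : Int) : Prop := out = solution_alt n table
instance (n : Int) (table : List (List Int)) (out : Int) : Decidable (Spec_solution n table out) := by unfold Spec_solution; infer_instance

-- ===== CLAIM (what is proved, stated in full; the proofs are below) =====
def Claim_equal_solution : Prop := ∀ (n : Int) (table : List (List Int)), Dom_solution n table → Pre_solution n table → Spec_solution n table (solution n table)

-- ===== LEMMAS AND PROOFS =====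
theorem ite_max (a b : Int) : (if a < b then b else a) = max a b := by
  split_ifs <;> omega

theorem phase1 (l : List (List Int)) (t : Int) :
    l.foldl (fun total row =>
      let cur := row.foldl (fun cur i => cur + i) 0
      if total < cur then cur else total) t
    = l.foldl (fun best row => max best row.sum) t := by
  apply PySem.List.foldl_congr_mem
  intro acc row _
  have h : row.foldl (fun cur i => cur + i) 0 = 0 + (row.map id).sum :=
    PySem.List.foldl_add (g := id) (l := row) (a := 0)
  simp only [h, List.map_id, zero_add, ite_max]

theorem take_map (xs : List (List Int)) (M : Nat) (h : M ≤ xs.length) (f : List Int → Int) :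
    (xs.take M).map f = (List.range M).map (fun k => f (xs.getD k [])) := by
  apply List.ext_getElem
  · simp [h]
  · intro i h1 h2
    simp only [List.getElem_map, List.getElem_take, List.getElem_range]
    rw [List.getD_eq_getElem _ _ (by simp at h1 ⊢; omega)]

theorem colsFold (rows : List (List Int)) : ∀ (cols : List Int),
    (∀ row ∈ rows, cols.length ≤ row.length) →
    rows.foldl (fun c row => (c.zip row).map (fun q => q.1 + q.2)) cols
    = (List.range cols.length).map
        (fun j => cols.getD j 0 + (rows.map (fun row => row.getD j 0)).sum) := by
  induction rows with
  | nil =>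
    intro cols _
    simp only [List.foldl_nil, List.map_nil, List.sum_nil, add_zero]
    symm
    apply List.ext_getElem
    · simp
    · intro i h1 h2
      simp only [List.getElem_map, List.getElem_range]
      rw [List.getD_eq_getElem _ _ (by simpa using h2)]
  | cons r rs ih =>
    intro cols h
    have hr : cols.length ≤ r.length := h r (List.mem_cons_self ..)
    have hlen : ((cols.zip r).map (fun q => q.1 + q.2)).length = cols.length := by
      simp [List.length_zip]; omega
    simp only [List.foldl_cons]
    rw [ih _ (by intro row hrow; rw [hlen]; exact h row (List.mem_cons_of_mem _ hrow)), hlen]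
    apply List.map_congr_left
    intro j hj
    rw [List.mem_range] at hj
    rw [List.getD_eq_getElem _ _ (by omega : j < ((cols.zip r).map (fun q => q.1 + q.2)).length)]
    simp only [List.getElem_map, List.getElem_zip, List.map_cons, List.sum_cons]
    rw [List.getD_eq_getElem _ _ (by omega), List.getD_eq_getElem _ _ (by omega)]
    ring

def normForm (n : Int) (table : List (List Int)) : Int :=
  let M := n.toNat
  let best := table.foldl (fun b row => max b row.sum) 0
  let best2 := (List.range M).foldl
      (fun t j => max t (((List.range M).map
        (fun k => ((table.getD k []).getD j 0 : Int))).sum)) best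
  max (max best2
        (((List.range M).map (fun k => ((table.getD k []).getD k 0 : Int))).sum))
      (((List.range M).map (fun k => ((table.getD k []).getD (M - 1 - k) 0 : Int))).sum)

theorem getD_take (xs : List (List Int)) (M k : Nat) (hk : k < M) (h : M ≤ xs.length) :
    (xs.take M).getD k [] = xs.getD k [] := by
  rw [List.getD_eq_getElem _ _ (by simp; omega), List.getD_eq_getElem _ _ (by omega)]
  simp [List.getElem_take]

theorem A_norm (n : Int) (table : List (List Int)) :
    solution n table = normForm n table := by
  unfold solution normForm
  dsimp only []
  rw [phase1, PySem.List.pyRange_zero, List.foldl_map, List.foldl_map]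
  rw [PySem.List.foldl_prod_mk
        (f := fun (a : Int) (y : Nat) => a + PySem.List.pyGetD (PySem.List.pyGetD table (y : Int) []) (y : Int) 0)
        (g := fun (a : Int) (y : Nat) => a + PySem.List.pyGetD (PySem.List.pyGetD table (y : Int) []) (n - (y : Int) - 1) 0)]
  dsimp only []
  rw [ite_max, ite_max]
  congr 1
  · congr 1
    · apply PySem.List.foldl_congr_mem
      intro acc j hj
      rw [List.foldl_map, PySem.List.foldl_add]
      simp only [PySem.List.pyGetD_natCast, zero_add, ite_max]
    · rw [PySem.List.foldl_add (l := List.range n.toNat)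
          (g := fun (y : Nat) => PySem.List.pyGetD (PySem.List.pyGetD table (y : Int) []) ((y : Int)) 0)]
      rw [zero_add]
      simp only [PySem.List.pyGetD_natCast]
  · rw [PySem.List.foldl_add (l := List.range n.toNat)
        (g := fun (y : Nat) => PySem.List.pyGetD (PySem.List.pyGetD table (y : Int) []) (n - (y : Int) - 1) 0)]
    rw [zero_add]
    apply congrArg
    apply List.map_congr_left
    intro k hk
    rw [List.mem_range] at hk
    have hidx : n - (k : Int) - 1 = ((n.toNat - 1 - k : Nat) : Int) := by omega
    rw [hidx]
    simp only [PySem.List.pyGetD_natCast]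

theorem B_norm (n : Int) (table : List (List Int)) (hpre : Pre_solution n table) :
    solution_alt n table = normForm n table := by
  obtain ⟨hlen, hrows⟩ := hpre
  unfold solution_alt normForm
  have hM : (if n > 0 then n else (0 : Int)) = ((n.toNat : Nat) : Int) := by
    split_ifs <;> omega
  rw [hM]
  dsimp only []
  rw [PySem.List.slice_to _ (Int.natCast_nonneg _)]
  simp only [Int.toNat_natCast]
  have hMlen : n.toNat ≤ table.length := by omega
  have hrl : (table.take n.toNat).length = n.toNat := by simp; omega
  rw [PySem.List.foldl_prod_mk
        (f := fun (c : List Int) (p : Int × List Int) => (c.zip p.2).map (fun q => q.1 + q.2))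
        (g := fun (d : Int × Int) (p : Int × List Int) =>
          (d.1 + PySem.List.pyGetD p.2 p.1 0,
           d.2 + PySem.List.pyGetD p.2 ((n.toNat : Int) - 1 - p.1) 0))]
  rw [PySem.List.foldl_prod_mk
        (f := fun (d : Int) (p : Int × List Int) => d + PySem.List.pyGetD p.2 p.1 0)
        (g := fun (d : Int) (p : Int × List Int) => d + PySem.List.pyGetD p.2 ((n.toNat : Int) - 1 - p.1) 0)]
  -- cols component
  have hcols : (PySem.List.enumerate (table.take n.toNat) 0).foldl
      (fun (c : List Int) (p : Int × List Int) => (c.zip p.2).map (fun q => q.1 + q.2))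
      (List.replicate n.toNat 0)
      = (List.range n.toNat).map
          (fun j => (((table.take n.toNat).map (fun row => row.getD j 0)).sum : Int)) := by
    conv_lhs => rw [show (PySem.List.enumerate (table.take n.toNat) 0) =
      (PySem.List.enumerate (table.take n.toNat) 0) from rfl]
    rw [show ((PySem.List.enumerate (table.take n.toNat) 0).foldl
        (fun (c : List Int) (p : Int × List Int) => (c.zip p.2).map (fun q => q.1 + q.2))
        (List.replicate n.toNat 0))
      = ((table.take n.toNat).foldl
        (fun (c : List Int) (row : List Int) => (c.zip row).map (fun q => q.1 + q.2))
        (List.replicate n.toNat 0)) from by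
        conv_rhs => rw [← PySem.List.map_snd_enumerate (table.take n.toNat) 0]
        rw [List.foldl_map]]
    rw [colsFold _ _ (by
      intro row hr
      have := hrows row hr
      simp only [List.length_replicate]
      omega)]
    simp only [List.length_replicate]
    apply List.map_congr_left
    intro j hj
    rw [List.mem_range] at hj
    rw [List.getD_replicate _ hj, zero_add]
  rw [hcols]
  rw [List.foldl_map]
  -- d components
  have hd1 : (PySem.List.enumerate (table.take n.toNat) 0).foldl
      (fun (d : Int) (p : Int × List Int) => d + PySem.List.pyGetD p.2 p.1 0) 0
      = ((List.range n.toNat).map (fun k => ((table.getD k []).getD k 0 : Int))).sum := by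
    rw [PySem.List.foldl_add, PySem.List.enumerate_eq_map_pyRange _ ([] : List Int)]
    simp only [PySem.List.len, hrl, PySem.List.pyRange_zero, List.map_map]
    rw [zero_add]
    apply congrArg
    apply List.map_congr_left
    intro k hk
    rw [List.mem_range] at hk
    simp only [Function.comp, PySem.List.pyGetD_natCast]
    rw [getD_take table n.toNat k hk hMlen]
  have hd2 : (PySem.List.enumerate (table.take n.toNat) 0).foldl
      (fun (d : Int) (p : Int × List Int) => d + PySem.List.pyGetD p.2 ((n.toNat : Int) - 1 - p.1) 0) 0
      = ((List.range n.toNat).map (fun k => ((table.getD k []).getD (n.toNat - 1 - k) 0 : Int))).sum := by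
    rw [PySem.List.foldl_add, PySem.List.enumerate_eq_map_pyRange _ ([] : List Int)]
    simp only [PySem.List.len, hrl, PySem.List.pyRange_zero, List.map_map]
    rw [zero_add]
    apply congrArg
    apply List.map_congr_left
    intro k hk
    rw [List.mem_range] at hk
    simp only [Function.comp, PySem.List.pyGetD_natCast]
    have hidx : (n.toNat : Int) - (k : Int) - 1 = ((n.toNat - 1 - k : Nat) : Int) := by omega
    rw [show ((n.toNat : Int) - 1 - (k : Int)) = ((n.toNat - 1 - k : Nat) : Int) from by omega]
    rw [PySem.List.pyGetD_natCast, getD_take table n.toNat k hk hMlen]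
  rw [hd1, hd2]
  rw [← max_assoc]
  congr 2
  apply PySem.List.foldl_congr_mem
  intro acc j hj
  rw [List.mem_range] at hj
  rw [take_map table n.toNat hMlen]

theorem solution_spec_aux (n : Int) (table : List (List Int))
    (hpre : Pre_solution n table) : solution n table = solution_alt n table := by
  rw [A_norm, B_norm n table hpre]

-- ===== VERDICT (by name: the statement is the Claim_ definition above) =====
theorem solution_spec : Claim_equal_solution := by
  intro n table _ hpre
  exact solution_spec_aux n table hpre
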